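-- pv_equiv track=rewrite | github.com/eugk123/leetcode-data-structures | problems/dynamic_programming/coin_change.py | coinChangeGivenCoins
-- ===== SOURCE A (Python) =====
-- def coinChangeGivenCoins(amount: int) -> int:
--     """
--     Given coins = [1, 2, 5], these are the step sizes of your problem.
--     We can break down the problem into sub-problems as follows:
--
--     Example amount = 100
--
--               f(100)
--            /-1  |-2  \-5
--         f(99) f(98) f(95)
--
--     """
--     # Initialize size of memo array, we add 1 to include amount = 0
--     # index = total amount, value = number of coins
--     dp = [0] * (amount + 1)
--
--     for i in range(len(dp)):
--         # We are storing index=TOTAL to dp[i]=NUMBER_OF_COINS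
--         # We are storing the number of coins. So when we add a penny, that's one more coin!
--         if i >= 1:
--             dp[i] = dp[i - 1] + 1
--
--         if i >= 2:
--             dp[i] = min(dp[i], dp[i - 2] + 1)
--
--         if i >= 5:
--             dp[i] = min(dp[i], dp[i - 5] + 1)
--
--     return dp[amount]
-- ===== SOURCE B (Python) =====
-- def coinChangeGivenCoins(amount: int) -> int:
--     # Greedy closed form: coins {1,2,5} form a canonical system, so
--     # take as many 5s as possible, then 2s, then a 1.
--     q, r = divmod(amount, 5)
--     return q + r // 2 + r % 2
-- ===== Notes on version B (the rewrite author's own statement) =====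
-- stated objective: faster
-- what changed: Replaced the O(n) dynamic-programming table over all amounts by the greedy closed form amount//5 + (amount%5)//2 + (amount%5)%2, valid because {1,2,5} is a canonical coin system.
import Mathlib
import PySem

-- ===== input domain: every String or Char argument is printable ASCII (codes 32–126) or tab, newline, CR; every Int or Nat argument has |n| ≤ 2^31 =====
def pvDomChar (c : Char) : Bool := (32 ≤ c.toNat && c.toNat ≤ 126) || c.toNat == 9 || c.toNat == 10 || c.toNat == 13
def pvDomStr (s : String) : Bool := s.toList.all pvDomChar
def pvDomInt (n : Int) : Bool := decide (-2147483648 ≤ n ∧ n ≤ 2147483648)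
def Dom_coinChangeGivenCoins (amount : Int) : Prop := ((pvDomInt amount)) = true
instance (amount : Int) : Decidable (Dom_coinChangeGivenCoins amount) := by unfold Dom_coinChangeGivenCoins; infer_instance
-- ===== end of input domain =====

-- B replaces A's O(n) DP table by the O(1) greedy closed form (canonical coin system {1,2,5}).

-- ===== PORT A =====
-- loop body of `for i in range(len(dp))`; Python's dp is a mutable array, ported as Array.
-- Every read dp[i-1]/dp[i-2]/dp[i-5]/dp[i] and every write dp[i] is guarded by i >= 1/2/5,
-- so the index is nonnegative and in range: Array.getD / Array.setIfInBounds are exact there.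
def ccStep (dp : Array Int) (i : Int) : Array Int :=
  let dp1 := if 1 ≤ i then dp.setIfInBounds i.toNat (dp.getD (i - 1).toNat 0 + 1) else dp
  let dp2 := if 2 ≤ i then dp1.setIfInBounds i.toNat
      (min (dp1.getD i.toNat 0) (dp1.getD (i - 2).toNat 0 + 1)) else dp1
  if 5 ≤ i then dp2.setIfInBounds i.toNat
      (min (dp2.getD i.toNat 0) (dp2.getD (i - 5).toNat 0 + 1)) else dp2

def coinChangeGivenCoins (amount : Int) : Int :=
  let dp0 : Array Int := Array.replicate (amount + 1).toNat 0
  let dp := (PySem.List.pyRange 0 (dp0.size : Int) 1).foldl ccStep dp0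
  PySem.List.pyGetD dp.toList amount 0

-- ===== PORT B =====
def coinChangeGivenCoins_alt (amount : Int) : Int :=
  PySem.Int.floordiv amount 5 + PySem.Int.floordiv (PySem.Int.mod amount 5) 2
    + PySem.Int.mod (PySem.Int.mod amount 5) 2

-- ===== PRECONDITION & SPEC =====
-- A raises IndexError for amount < 0 (dp[amount] on a too-short list); excluded.
def Pre_coinChangeGivenCoins (amount : Int) : Prop := 0 ≤ amount
instance (amount : Int) : Decidable (Pre_coinChangeGivenCoins amount) := by
  unfold Pre_coinChangeGivenCoins; infer_instance
def pvWitness_coinChangeGivenCoins : Int := 7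

def Spec_coinChangeGivenCoins (amount : Int) (out : Int) : Prop := out = coinChangeGivenCoins_alt amount
instance (amount : Int) (out : Int) : Decidable (Spec_coinChangeGivenCoins amount out) := by unfold Spec_coinChangeGivenCoins; infer_instance

-- ===== CLAIM (what is proved, stated in full; the proofs are below) =====
def Claim_equal_coinChangeGivenCoins : Prop := ∀ (amount : Int), Dom_coinChangeGivenCoins amount → Pre_coinChangeGivenCoins amount → Spec_coinChangeGivenCoins amount (coinChangeGivenCoins amount)

-- ===== LEMMAS AND PROOFS =====

-- list-level mirror of ccStep, used only by the proofs
def ccStepL (dp : List Int) (i : Int) : List Int :=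
  let dp1 := if 1 ≤ i then PySem.List.pySetD dp i (PySem.List.pyGetD dp (i - 1) 0 + 1) else dp
  let dp2 := if 2 ≤ i then PySem.List.pySetD dp1 i
      (min (PySem.List.pyGetD dp1 i 0) (PySem.List.pyGetD dp1 (i - 2) 0 + 1)) else dp1
  if 5 ≤ i then PySem.List.pySetD dp2 i
      (min (PySem.List.pyGetD dp2 i 0) (PySem.List.pyGetD dp2 (i - 5) 0 + 1)) else dp2

lemma arrSet_toList (a : Array Int) (j : Int) (hj : 0 ≤ j) (v : Int) :
    (a.setIfInBounds j.toNat v).toList = PySem.List.pySetD a.toList j v := by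
  rw [Array.toList_setIfInBounds, PySem.List.pySetD_of_nonneg (xs := a.toList) (v := v) hj]

lemma arrGet_toList (a : Array Int) (j : Int) (hj : 0 ≤ j) :
    a.getD j.toNat 0 = PySem.List.pyGetD a.toList j 0 := by
  have : a.getD j.toNat 0 = a.toList.getD j.toNat 0 := by
    rw [List.getD, Array.getD_eq_getD_getElem?, ← Array.getElem?_toList]
  rw [this]
  by_cases hlt : j < (a.toList.length : Int)
  · rw [PySem.List.pyGetD_eq_getElem a.toList 0 hj hlt, List.getD_eq_getElem a.toList 0 (by omega)]
  · rw [PySem.List.pyGetD_of_none, List.getD_eq_default]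
    · omega
    · rw [PySem.List.pyGet?_eq_none_iff, PySem.Raise.InRange]
      omega

lemma ccStep_toList (dp : Array Int) (i : Int) (h : 0 ≤ i) :
    (ccStep dp i).toList = ccStepL dp.toList i := by
  simp only [ccStep, ccStepL]
  by_cases h1 : (1:Int) ≤ i
  · rw [if_pos h1, if_pos h1]
    have h1l : (dp.setIfInBounds i.toNat (dp.getD (i - 1).toNat 0 + 1)).toList
        = PySem.List.pySetD dp.toList i (PySem.List.pyGetD dp.toList (i - 1) 0 + 1) := by
      rw [arrGet_toList dp (i - 1) (by omega), arrSet_toList dp i h]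
    by_cases h2 : (2:Int) ≤ i
    · rw [if_pos h2, if_pos h2]
      set A1 := dp.setIfInBounds i.toNat (dp.getD (i - 1).toNat 0 + 1) with hA1
      set L1 := PySem.List.pySetD dp.toList i (PySem.List.pyGetD dp.toList (i - 1) 0 + 1) with hL1
      have h2l : (A1.setIfInBounds i.toNat (min (A1.getD i.toNat 0) (A1.getD (i - 2).toNat 0 + 1))).toList
          = PySem.List.pySetD L1 i (min (PySem.List.pyGetD L1 i 0) (PySem.List.pyGetD L1 (i - 2) 0 + 1)) := by
        rw [arrGet_toList A1 i h, arrGet_toList A1 (i - 2) (by omega), arrSet_toList A1 i h, h1l]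
      by_cases h5 : (5:Int) ≤ i
      · rw [if_pos h5, if_pos h5]
        set A2 := A1.setIfInBounds i.toNat (min (A1.getD i.toNat 0) (A1.getD (i - 2).toNat 0 + 1)) with hA2
        set L2 := PySem.List.pySetD L1 i (min (PySem.List.pyGetD L1 i 0) (PySem.List.pyGetD L1 (i - 2) 0 + 1)) with hL2
        rw [arrGet_toList A2 i h, arrGet_toList A2 (i - 5) (by omega), arrSet_toList A2 i h, h2l]
      · rw [if_neg h5, if_neg h5, h2l]
    · rw [if_neg h2, if_neg h2]
      by_cases h5 : (5:Int) ≤ i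
      · omega
      · rw [if_neg h5, if_neg h5, h1l]
  · rw [if_neg h1, if_neg h1]
    by_cases h2 : (2:Int) ≤ i
    · omega
    · rw [if_neg h2, if_neg h2]
      by_cases h5 : (5:Int) ≤ i
      · omega
      · rw [if_neg h5, if_neg h5]

lemma fold_toList (l : List Int) : ∀ (dp : Array Int), (∀ x ∈ l, 0 ≤ x) →
    (l.foldl ccStep dp).toList = l.foldl ccStepL dp.toList := by
  induction l with
  | nil => intro dp _; simp
  | cons x xs ih =>
    intro dp hx
    simp only [List.foldl_cons]
    rw [ih _ (fun y hy => hx y (List.mem_cons_of_mem _ hy)),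
      ccStep_toList dp x (hx x List.mem_cons_self)]

-- the greedy value, as a function of the (nonnegative) amount
def ccG (i : Int) : Int := i / 5 + i % 5 / 2 + i % 5 % 2

lemma ccG_zero : ccG 0 = 0 := by decide

lemma ccG_one : ccG 1 = ccG 0 + 1 := by decide

lemma ccG_two_le (i : Int) (h2 : 2 ≤ i) (h5 : i < 5) :
    min (ccG (i - 1) + 1) (ccG (i - 2) + 1) = ccG i := by
  unfold ccG; omega

lemma ccG_five_le (i : Int) (_ : 5 ≤ i) :
    min (min (ccG (i - 1) + 1) (ccG (i - 2) + 1)) (ccG (i - 5) + 1) = ccG i := by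
  unfold ccG; omega

lemma getD_map_range' (m : Nat) (h : Nat → Int) (k : Nat) (hk' : k < m) :
    ((List.range m).map h).getD k 0 = h k := by
  rw [List.getD_eq_getElem _ _ (by simpa using hk')]
  simp

lemma set_map_range (m : Nat) (h : Nat → Int) (k : Nat) (v : Int) (_ : k < m) :
    ((List.range m).map h).set k v
      = (List.range m).map (fun (j : Nat) => if j = k then v else h j) := by
  apply List.ext_getElem
  · simp
  · intro j hj _
    simp only [List.getElem_set, List.getElem_map, List.getElem_range]
    by_cases hjk : k = j
    · subst hjk; simp
    · rw [if_neg hjk, if_neg (fun h' => hjk h'.symm)]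

lemma ccStep_inv (m n : Nat) (hn : n < m) :
    ccStepL ((List.range m).map (fun (j : Nat) => if (j : Int) < (n : Int) then ccG (j : Int) else 0)) (n : Int)
      = (List.range m).map (fun (j : Nat) => if (j : Int) < ((n : Int) + 1) then ccG (j : Int) else 0) := by
  set f : Nat → Int := fun (j : Nat) => if (j : Int) < (n : Int) then ccG (j : Int) else 0 with hf
  simp only [ccStepL]
  rcases Nat.lt_or_ge n 1 with h1 | h1
  · -- n = 0 : all guards false
    have hn0 : n = 0 := by omega
    subst hn0
    rw [if_neg (show ¬ ((1:Int) ≤ ((0:Nat):Int)) by omega),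
      if_neg (show ¬ ((2:Int) ≤ ((0:Nat):Int)) by omega),
      if_neg (show ¬ ((5:Int) ≤ ((0:Nat):Int)) by omega)]
    apply List.map_congr_left
    intro j _
    simp only [hf]
    rw [if_neg (show ¬ ((j:Int) < ((0:Nat):Int)) by omega)]
    by_cases hj1 : (j : Int) < ((0:Nat) : Int) + 1
    · have : j = 0 := by omega
      subst this
      rw [if_pos hj1, Nat.cast_zero, ccG_zero]
    · rw [if_neg hj1]
  · -- n ≥ 1 : first branch fires
    have h1' : (1 : Int) ≤ (n : Int) := by omega
    have hget : ∀ k : Nat, k < n → ((List.range m).map f).getD k 0 = ccG (k : Int) := by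
      intro k hk
      rw [getD_map_range' m f k (by omega)]
      simp [hf, hk]
    have g1 : PySem.List.pyGetD ((List.range m).map f) ((n : Int) - 1) 0 = ccG ((n : Int) - 1) := by
      rw [show (n : Int) - 1 = ((n - 1 : Nat) : Int) by omega, PySem.List.pyGetD_natCast,
        hget _ (by omega)]
    rw [if_pos h1', g1]
    simp only [PySem.List.pySetD_natCast]
    rw [set_map_range m f n _ hn]
    set f1 : Nat → Int := fun (j : Nat) => if j = n then ccG ((n : Int) - 1) + 1 else f j with hf1
    rcases Nat.lt_or_ge n 2 with h2 | h2
    · -- n = 1 : only the first branch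
      have hn1 : n = 1 := by omega
      rw [if_neg (show ¬ ((2:Int) ≤ (n:Int)) by omega),
        if_neg (show ¬ ((5:Int) ≤ (n:Int)) by omega)]
      apply List.map_congr_left
      intro j _
      simp only [hf1, hf]
      by_cases hjn : j = n
      · subst hjn
        rw [if_pos rfl, if_pos (show ((j:Int) < (j:Int) + 1) by omega)]
        subst hn1
        rw [show ((1:Nat):Int) = 1 from rfl, show (1:Int) - 1 = 0 by ring, ccG_one]
      · rw [if_neg hjn]
        by_cases hjlt : (j : Int) < (n : Int)
        · rw [if_pos hjlt, if_pos (by omega)]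
        · rw [if_neg hjlt, if_neg (by omega)]
    · -- n ≥ 2 : second branch fires
      have h2' : (2 : Int) ≤ (n : Int) := by omega
      have hget1 : ∀ k : Nat, k < n → ((List.range m).map f1).getD k 0 = ccG (k : Int) := by
        intro k hk
        have hkn' : k ≠ n := by omega
        rw [getD_map_range' m f1 k (by omega)]
        simp [hf1, hf, hk, hkn']
      have g2 : PySem.List.pyGetD ((List.range m).map f1) ((n : Int) - 2) 0 = ccG ((n : Int) - 2) := by
        rw [show (n : Int) - 2 = ((n - 2 : Nat) : Int) by omega, PySem.List.pyGetD_natCast,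
          hget1 _ (by omega)]
      have g2n : PySem.List.pyGetD ((List.range m).map f1) ((n : Int)) 0 = ccG ((n : Int) - 1) + 1 := by
        rw [PySem.List.pyGetD_natCast, getD_map_range' m f1 n hn, hf1]
        beta_reduce
        rw [if_pos rfl]
      rw [if_pos h2', g2, g2n, set_map_range m f1 n _ hn]
      set v2 : Int := min (ccG ((n : Int) - 1) + 1) (ccG ((n : Int) - 2) + 1) with hv2
      set f2 : Nat → Int := fun (j : Nat) => if j = n then v2 else f1 j with hf2
      rcases Nat.lt_or_ge n 5 with h5 | h5
      · -- 2 ≤ n < 5 : third branch off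
        rw [if_neg (show ¬ ((5:Int) ≤ (n:Int)) by omega)]
        apply List.map_congr_left
        intro j _
        simp only [hf2, hf1, hf]
        by_cases hjn : j = n
        · subst hjn
          rw [if_pos rfl, if_pos (show ((j:Int) < (j:Int) + 1) by omega), hv2]
          exact ccG_two_le (j : Int) h2' (by omega)
        · rw [if_neg hjn, if_neg hjn]
          by_cases hjlt : (j : Int) < (n : Int)
          · rw [if_pos hjlt, if_pos (by omega)]
          · rw [if_neg hjlt, if_neg (by omega)]
      · -- n ≥ 5 : third branch fires
        have h5' : (5 : Int) ≤ (n : Int) := by omega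
        have hget2 : ∀ k : Nat, k < n → ((List.range m).map f2).getD k 0 = ccG (k : Int) := by
          intro k hk
          have hkn' : k ≠ n := by omega
          rw [getD_map_range' m f2 k (by omega)]
          simp [hf2, hf1, hf, hk, hkn']
        have g5 : PySem.List.pyGetD ((List.range m).map f2) ((n : Int) - 5) 0 = ccG ((n : Int) - 5) := by
          rw [show (n : Int) - 5 = ((n - 5 : Nat) : Int) by omega, PySem.List.pyGetD_natCast,
            hget2 _ (by omega)]
        have g5n : PySem.List.pyGetD ((List.range m).map f2) ((n : Int)) 0 = v2 := by
          rw [PySem.List.pyGetD_natCast, getD_map_range' m f2 n hn, hf2]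
          beta_reduce
          rw [if_pos rfl]
        rw [if_pos h5', g5, g5n, set_map_range m f2 n _ hn]
        apply List.map_congr_left
        intro j _
        simp only [hf2, hf1, hf]
        by_cases hjn : j = n
        · subst hjn
          rw [if_pos rfl, if_pos (show ((j:Int) < (j:Int) + 1) by omega), hv2]
          exact ccG_five_le (j : Int) h5'
        · rw [if_neg hjn, if_neg hjn, if_neg hjn]
          by_cases hjlt : (j : Int) < (n : Int)
          · rw [if_pos hjlt, if_pos (by omega)]
          · rw [if_neg hjlt, if_neg (by omega)]

lemma cc_fold (m : Nat) : ∀ n : Nat, n ≤ m →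
    (PySem.List.pyRange 0 (n : Int) 1).foldl ccStepL (List.replicate m 0)
      = (List.range m).map (fun (j : Nat) => if (j : Int) < (n : Int) then ccG (j : Int) else 0) := by
  intro n
  induction n with
  | zero =>
    intro _
    rw [PySem.List.pyRange_one_eq_nil (by decide)]
    simp only [List.foldl_nil]
    apply List.ext_getElem
    · simp
    · intro j hj _
      simp only [List.getElem_replicate, List.getElem_map, List.getElem_range]
      rw [if_neg (by omega)]
  | succ k ih =>
    intro hk
    have hc : ((k + 1 : Nat) : Int) = (k : Int) + 1 := by push_cast; ring
    rw [hc, PySem.List.pyRange_one_succ_right (by positivity), List.foldl_append,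
      ih (by omega), List.foldl_cons, List.foldl_nil, ccStep_inv m k (by omega)]

lemma ccG_eq_alt (amount : Int) :
    ccG amount = coinChangeGivenCoins_alt amount := by
  unfold ccG coinChangeGivenCoins_alt
  rw [PySem.Int.floordiv_eq_ediv_of_pos (by decide), PySem.Int.mod_eq_emod_of_pos (by decide),
    PySem.Int.floordiv_eq_ediv_of_pos (by decide), PySem.Int.mod_eq_emod_of_pos (by decide)]

-- ===== VERDICT (by name: the statement is the Claim_ definition above) =====
theorem coinChangeGivenCoins_spec : Claim_equal_coinChangeGivenCoins := by
  intro amount _ hpre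
  unfold Pre_coinChangeGivenCoins at hpre
  unfold Spec_coinChangeGivenCoins coinChangeGivenCoins
  show PySem.List.pyGetD
      ((PySem.List.pyRange 0 (((Array.replicate (amount + 1).toNat (0:Int)).size : Nat) : Int) 1).foldl
        ccStep (Array.replicate (amount + 1).toNat 0)).toList amount 0
    = coinChangeGivenCoins_alt amount
  rw [Array.size_replicate,
    fold_toList _ _ (fun x hx => ((PySem.List.mem_pyRange_one).mp hx).1),
    Array.toList_replicate, cc_fold (amount + 1).toNat (amount + 1).toNat (le_refl _)]
  have hanat : amount = ((amount.toNat : Nat) : Int) := by omega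
  rw [hanat, PySem.List.pyGetD_natCast,
    getD_map_range' _ _ amount.toNat (by omega), if_pos (by omega), ← hanat]
  exact ccG_eq_alt amount
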